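-- pv_equiv track=rewrite | github.com/doyoubi/undermoon | examples/failover/checker.py | gen_final_config
-- ===== SOURCE A (Python) =====
-- def gen_final_config(failed_nodes, init_slots_config):
--     missing_slots = sum(
--         [slots for node, slots in init_slots_config.items()
--          if node in failed_nodes],
--         [])
--
--     config = {node: slots for node, slots in init_slots_config.items()
--               if node not in failed_nodes}
--
--     while missing_slots and config.keys():
--         for node in config.keys():
--             if not missing_slots:
--                 break
--             config[node].append(missing_slots.pop())
--
--     return config
-- ===== SOURCE B (Python) =====
-- def gen_final_config(failed_nodes, init_slots_config):
--     missing = []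
--     for node, slots in init_slots_config.items():
--         if node in failed_nodes:
--             missing.extend(slots)
--     rev = missing[::-1]
--     survivors = [(n, s) for n, s in init_slots_config.items()
--                  if n not in failed_nodes]
--     n = len(survivors)
--     return {node: slots + rev[j::n] for j, (node, slots) in enumerate(survivors)}
-- ===== Notes on version B (the rewrite author's own statement) =====
-- stated objective: alternative
-- what changed: Replaces A's repeated while/for round-robin passes that pop one slot at a time (mutating the slot lists in place) by a single pass that gives the j-th survivor the stride rev[j::n] of the reversed missing-slot list; B does not mutate its inputs.
import Mathlib
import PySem

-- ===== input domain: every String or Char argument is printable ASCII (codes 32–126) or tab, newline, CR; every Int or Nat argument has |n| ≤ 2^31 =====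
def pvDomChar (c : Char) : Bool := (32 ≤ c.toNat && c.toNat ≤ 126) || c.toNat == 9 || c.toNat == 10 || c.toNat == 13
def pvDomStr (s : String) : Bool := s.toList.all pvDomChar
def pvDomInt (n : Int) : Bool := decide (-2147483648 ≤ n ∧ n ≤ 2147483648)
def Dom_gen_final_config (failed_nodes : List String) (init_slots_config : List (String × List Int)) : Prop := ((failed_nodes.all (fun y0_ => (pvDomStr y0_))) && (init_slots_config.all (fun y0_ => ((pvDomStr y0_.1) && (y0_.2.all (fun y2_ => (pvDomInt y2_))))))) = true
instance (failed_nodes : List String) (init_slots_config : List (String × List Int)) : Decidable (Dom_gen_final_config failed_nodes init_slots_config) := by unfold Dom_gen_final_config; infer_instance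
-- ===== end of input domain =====

-- B replaces A's repeated pop-one-slot round-robin passes by a single pass handing each
-- survivor a stride of the reversed missing-slot list (objective: alternative decomposition).
-- Note on side effects: Python A mutates init_slots_config's slot lists in place; B does not.
-- The equivalence proved here is about the RETURN value only.

-- ===== PORT A =====
-- one 'for node in config.keys()' pass: append missing_slots.pop() to each node, break when empty
def pvPass : List (String × List Int) → List Int → (List (String × List Int)) × List Int
  | [], m => ([], m)
  | p :: rest, m =>
    match PySem.List.pop? m (-1) with      -- missing_slots.pop(); none = 'if not missing_slots: break'
    | none => (p :: rest, m)
    | some (x, m') =>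
      let r := pvPass rest m'
      ((p.1, p.2 ++ [x]) :: r.1, r.2)

theorem pvPass_len_le (c : List (String × List Int)) : ∀ (m : List Int), (pvPass c m).2.length ≤ m.length := by
  induction c with
  | nil => intro m; simp [pvPass]
  | cons p rest ih =>
    intro m
    cases hm : PySem.List.pop? m (-1) with
    | none => simp [pvPass, hm]
    | some r =>
      obtain ⟨x, m'⟩ := r
      have hlen : m'.length + 1 = m.length := PySem.List.length_of_pop?_eq_some m hm
      simp only [pvPass, hm]
      have := ih m'
      omega

theorem pvPass_len_lt (c : List (String × List Int)) (m : List Int) (hc : c ≠ []) (hm : m ≠ []) :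
    (pvPass c m).2.length < m.length := by
  obtain ⟨p, rest, rfl⟩ := List.exists_cons_of_ne_nil hc
  obtain ⟨t, y, rfl⟩ := (List.eq_nil_or_concat m).resolve_left hm
  simp only [List.concat_eq_append]
  have hp : PySem.List.pop? (t ++ [y]) (-1) = some (y, t) := PySem.List.pop?_last t y
  simp only [pvPass]
  rw [hp]
  have := pvPass_len_le rest t
  simp
  omega

-- the 'while missing_slots and config.keys()' loop
def pvLoop (c : List (String × List Int)) (m : List Int) : List (String × List Int) :=
  if h : m = [] ∨ c = [] then c  -- h used by decreasing_by
  else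
    let r := pvPass c m
    pvLoop r.1 r.2
termination_by m.length
decreasing_by
  exact pvPass_len_lt c m (fun hc => h (Or.inr hc)) (fun hm => h (Or.inl hm))

def gen_final_config (failed_nodes : List String) (init_slots_config : List (String × List Int)) : List (String × List Int) :=
  -- sum([slots for node, slots in init_slots_config.items() if node in failed_nodes], [])
  let missing_slots :=
    ((init_slots_config.filter (fun p => failed_nodes.contains p.1)).map (fun p => p.2)).foldl
      (fun acc s => acc ++ s) []
  -- {node: slots for node, slots in init_slots_config.items() if node not in failed_nodes}
  let config := init_slots_config.filter (fun p => !failed_nodes.contains p.1)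
  pvLoop config missing_slots

-- ===== PORT B =====
-- rev[j::n] : stride n of rev.drop j (exact for j ≥ 0, n ≥ 1, the only way B evaluates it)
def pvStrided (N : Nat) : List Int → List Int
  | [] => []
  | x :: rest => x :: pvStrided N (rest.drop (N - 1))
termination_by l => l.length
decreasing_by
  simp only [List.length_drop, List.length_cons]; omega

-- the dict comprehension '{node: slots + rev[j::n] for j, (node, slots) in enumerate(survivors)}';
-- the recursion drops one element of rev per step, so at step j its list argument is rev.drop j
def pvMapStr (N : Nat) : List (String × List Int) → List Int → List (String × List Int)
  | [], _ => []
  | (n, s) :: rest, r => (n, s ++ pvStrided N r) :: pvMapStr N rest (r.drop 1)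

def gen_final_config_alt (failed_nodes : List String) (init_slots_config : List (String × List Int)) : List (String × List Int) :=
  let missing := init_slots_config.foldl
    (fun acc p => if failed_nodes.contains p.1 then acc ++ p.2 else acc) []
  let rev := missing.reverse
  let survivors := init_slots_config.filter (fun p => !failed_nodes.contains p.1)
  pvMapStr survivors.length survivors rev

-- ===== PRECONDITION & SPEC =====
-- Pre_ excludes duplicate keys in init_slots_config: a Python dict cannot carry them (the
-- generated association list collapses in Python before A even runs), so the corner is an
-- artefact of the List (String × List Int) encoding, not a behaviour of A.
def Pre_gen_final_config (failed_nodes : List String) (init_slots_config : List (String × List Int)) : Prop :=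
  (init_slots_config.map Prod.fst).Nodup
instance (failed_nodes : List String) (init_slots_config : List (String × List Int)) : Decidable (Pre_gen_final_config failed_nodes init_slots_config) := by unfold Pre_gen_final_config; infer_instance

def pvWitness_gen_final_config : List String × (List (String × List Int)) :=
  (["a"], [("a", [1, 2, 3]), ("b", [4]), ("c", [])])

def Spec_gen_final_config (failed_nodes : List String) (init_slots_config : List (String × List Int)) (out : List (String × List Int)) : Prop := out = gen_final_config_alt failed_nodes init_slots_config
instance (failed_nodes : List String) (init_slots_config : List (String × List Int)) (out : List (String × List Int)) : Decidable (Spec_gen_final_config failed_nodes init_slots_config out) := by unfold Spec_gen_final_config; infer_instance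

-- ===== CLAIM (what is proved, stated in full; the proofs are below) =====
def Claim_equal_gen_final_config : Prop := ∀ (failed_nodes : List String) (init_slots_config : List (String × List Int)), Dom_gen_final_config failed_nodes init_slots_config → Pre_gen_final_config failed_nodes init_slots_config → Spec_gen_final_config failed_nodes init_slots_config (gen_final_config failed_nodes init_slots_config)

-- ===== LEMMAS AND PROOFS =====

-- A's missing_slots (filter-map-sum) equals B's missing (one fold with a conditional append)
theorem pv_missing_eq (P : String × List Int → Bool) :
    ∀ (l : List (String × List Int)) (acc : List Int),
      ((l.filter P).map (fun p => p.2)).foldl (fun a s => a ++ s) acc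
        = l.foldl (fun a p => if P p then a ++ p.2 else a) acc := by
  intro l
  induction l with
  | nil => intro acc; simp
  | cons p rest ih =>
    intro acc
    by_cases h : P p <;> simp [h, ih]

-- the effect of ONE pass of A's inner for-loop, phrased over r = missing.reverse:
-- node j receives r[j]; pvDist performs exactly that
def pvDist : List (String × List Int) → List Int → List (String × List Int)
  | [], _ => []
  | c, [] => c
  | (n, s) :: rest, x :: r => (n, s ++ [x]) :: pvDist rest r

theorem pvPass_eq (c : List (String × List Int)) :
    ∀ (r : List Int), pvPass c r.reverse = (pvDist c r, (r.drop c.length).reverse) := by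
  induction c with
  | nil => intro r; simp [pvPass, pvDist]
  | cons p rest ih =>
    intro r
    cases r with
    | nil => simp [pvPass, pvDist, PySem.List.pop?]
    | cons x r' =>
      have hrev : (x :: r').reverse = r'.reverse ++ [x] := by simp
      have hp : PySem.List.pop? ((x :: r').reverse) (-1) = some (x, r'.reverse) := by
        rw [hrev]; exact PySem.List.pop?_last r'.reverse x
      obtain ⟨n, s⟩ := p
      simp only [pvPass, hp, ih r', pvDist, List.length_cons, List.drop_succ_cons]

theorem pvDist_length : ∀ (c : List (String × List Int)) (r : List Int),
    (pvDist c r).length = c.length := by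
  intro c
  induction c with
  | nil => intro r; simp [pvDist]
  | cons p rest ih =>
    intro r
    cases r with
    | nil => simp [pvDist]
    | cons x r' => obtain ⟨n, s⟩ := p; simp [pvDist, ih]

theorem pvMapStr_nil_r (N : Nat) : ∀ (c : List (String × List Int)), pvMapStr N c [] = c := by
  intro c
  induction c with
  | nil => simp [pvMapStr]
  | cons p rest ih => obtain ⟨n, s⟩ := p; simp [pvMapStr, pvStrided, ih]

-- one round of the distribution, absorbed into the stride
theorem pvDist_mapStr (N : Nat) (hN : 0 < N) :
    ∀ (c : List (String × List Int)) (r : List Int),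
      pvMapStr N (pvDist c r) (r.drop N) = pvMapStr N c r := by
  intro c
  induction c with
  | nil => intro r; simp [pvDist, pvMapStr]
  | cons p rest ih =>
    intro r
    obtain ⟨n, s⟩ := p
    cases r with
    | nil => simp [pvDist, List.drop_nil]
    | cons x r' =>
      have hdropN : (x :: r').drop N = r'.drop (N - 1) := by
        obtain ⟨k, rfl⟩ := Nat.exists_eq_add_of_lt hN
        simp
      have hdd : (r'.drop (N - 1)).drop 1 = r'.drop N := by
        rw [List.drop_drop]; congr 1; omega
      simp only [pvDist, pvMapStr, hdropN, hdd, ih r', pvStrided, List.append_assoc,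
        List.singleton_append, List.drop_succ_cons, List.drop_zero]

-- full characterisation of A's while-loop (fuel = length of the reversed missing list)
theorem pvLoop_char : ∀ (k : Nat) (r : List Int) (c : List (String × List Int)),
    r.length ≤ k → pvLoop c r.reverse = pvMapStr c.length c r := by
  intro k
  induction k with
  | zero =>
    intro r c hr
    have : r = [] := List.eq_nil_of_length_eq_zero (by omega)
    subst this
    rw [pvLoop, pvMapStr_nil_r]
    simp
  | succ k ih =>
    intro r c hr
    by_cases hc : c = []
    · subst hc; rw [pvLoop]; · simp [pvMapStr]
    by_cases hrn : r = []
    · subst hrn; rw [pvLoop, pvMapStr_nil_r]; simp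
    have hN : 0 < c.length := List.length_pos_of_ne_nil hc
    rw [pvLoop]
    have hcond : ¬(r.reverse = [] ∨ c = []) := by
      simp [hrn, hc]
    rw [dif_neg hcond]
    simp only [pvPass_eq c r]
    have hlen : (r.drop c.length).length ≤ k := by
      have := List.length_pos_of_ne_nil hrn
      simp only [List.length_drop]
      omega
    rw [ih (r.drop c.length) (pvDist c r) hlen, pvDist_length, pvDist_mapStr c.length hN]

-- ===== VERDICT (by name: the statement is the Claim_ definition above) =====
theorem gen_final_config_spec : Claim_equal_gen_final_config := by
  unfold Claim_equal_gen_final_config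
  intro failed init _ _
  unfold Spec_gen_final_config gen_final_config gen_final_config_alt
  rw [pv_missing_eq]
  set m := init.foldl (fun a p => if failed.contains p.1 then a ++ p.2 else a) ([] : List Int) with hm
  have := pvLoop_char m.reverse.length m.reverse
    (init.filter (fun p => !failed.contains p.1)) (le_refl _)
  simpa using this
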